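-- pv_equiv track=rewrite | github.com/bangtugu/Algorithm | PROGRAMMERS/시소_짝꿍.py | solution
-- ===== SOURCE A (Python) =====
-- def solution(weights):
--     w_dic = {}
--
--     for w in weights:
--         if w in w_dic.keys():
--             w_dic[w] += 1
--         else:
--             w_dic[w] = 1
--
--     w_set = set(w_dic.keys())
--     w_lst = list(w_set)
--     w_lst.sort()
--
--     answer = 0
--     for w in w_lst:
--         for p in w_lst:
--             if w == p:
--                 answer += w_dic[w] * (w_dic[w]-1)//2
--             elif w*4 == p*3:
--                 answer += w_dic[w] * w_dic[p]
--             elif w*2 == p: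
--                 answer += w_dic[w] * w_dic[p]
--             elif w*3 == p*2:
--                 answer += w_dic[w] * w_dic[p]
--
--     return answer
-- ===== SOURCE B (Python) =====
-- def solution(weights):
--     # Build a frequency dict once; for each distinct weight, add same-weight
--     # pairs and look up its constant-many heavier ratio partners in O(1).
--     cnt = {}
--     for w in weights:
--         cnt[w] = cnt.get(w, 0) + 1
--     total = 0
--     for w, c in cnt.items():
--         total += c * (c - 1) // 2
--         partners = [2 * w]
--         if w % 3 == 0:
--             partners.append(4 * w // 3)
--         if w % 2 == 0:
--             partners.append(3 * w // 2)
--         for p in partners: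
--             if p != w and p in cnt:
--                 total += c * cnt[p]
--     return total
-- ===== Notes on version B (the rewrite author's own statement) =====
-- stated objective: faster
-- what changed: A scans all pairs of distinct weights (quadratic in the number of distinct weights, after a sort); B builds the frequency dict in one pass and, for each distinct weight, looks up only its constant-many ratio partners (2w, 4w/3, 3w/2) in O(1), with no sort and no inner scan.
import Mathlib
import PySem

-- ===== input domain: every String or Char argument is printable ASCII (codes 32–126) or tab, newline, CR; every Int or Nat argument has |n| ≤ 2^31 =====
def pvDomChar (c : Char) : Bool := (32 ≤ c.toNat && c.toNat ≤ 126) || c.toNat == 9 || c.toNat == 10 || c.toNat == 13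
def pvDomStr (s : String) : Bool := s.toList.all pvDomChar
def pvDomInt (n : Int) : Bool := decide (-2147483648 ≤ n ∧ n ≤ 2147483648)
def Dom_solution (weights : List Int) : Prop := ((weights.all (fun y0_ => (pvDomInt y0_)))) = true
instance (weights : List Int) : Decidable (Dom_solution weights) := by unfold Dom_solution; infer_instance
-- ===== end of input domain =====

-- B replaces A's quadratic double scan over the distinct weights by a single pass
-- that looks up each weight's constant-many ratio partners in the frequency dict.

-- ===== PORT A =====
def solution (weights : List Int) : Int :=
  let w_dic := weights.foldl (fun d w =>
      if d.contains w then d.modify w 0 (· + 1) else d.insert w 1)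
    PySem.Dict.empty
  let w_lst := PySem.List.sorted (PySem.Set.ofList w_dic.keys) (fun x => x) false
  w_lst.foldl (fun answer w =>
    w_lst.foldl (fun answer p =>
      if w = p then
        answer + PySem.Int.floordiv (w_dic.getD w 0 * (w_dic.getD w 0 - 1)) 2
      else if w * 4 = p * 3 then answer + w_dic.getD w 0 * w_dic.getD p 0
      else if w * 2 = p then answer + w_dic.getD w 0 * w_dic.getD p 0
      else if w * 3 = p * 2 then answer + w_dic.getD w 0 * w_dic.getD p 0
      else answer) answer) 0

-- ===== PORT B =====
def solution_alt (weights : List Int) : Int :=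
  let cnt := weights.foldl (fun d w => d.insert w (d.getD w 0 + 1)) PySem.Dict.empty
  cnt.items.foldl (fun total wc =>
    let partners := [2 * wc.1]
      ++ (if PySem.Int.mod wc.1 3 = 0 then [PySem.Int.floordiv (4 * wc.1) 3] else [])
      ++ (if PySem.Int.mod wc.1 2 = 0 then [PySem.Int.floordiv (3 * wc.1) 2] else [])
    partners.foldl (fun t p =>
        if p ≠ wc.1 ∧ cnt.contains p = true then t + wc.2 * cnt.getD p 0 else t)
      (total + PySem.Int.floordiv (wc.2 * (wc.2 - 1)) 2)) 0

-- ===== PRECONDITION & SPEC =====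
def Spec_solution (weights : List Int) (out : Int) : Prop := out = solution_alt weights
instance (weights : List Int) (out : Int) : Decidable (Spec_solution weights out) := by unfold Spec_solution; infer_instance

-- ===== CLAIM (what is proved, stated in full; the proofs are below) =====
def Claim_equal_solution : Prop := ∀ (weights : List Int), Dom_solution weights → Spec_solution weights (solution weights)

-- ===== LEMMAS AND PROOFS =====

-- count of p in xs, as an Int
def pvCnt (xs : List Int) (p : Int) : Int := (xs.count p : Int)

-- the contribution A's inner loop adds for the ordered pair (w, p)
def pvPhi (xs : List Int) (w p : Int) : Int :=
  if w = p then PySem.Int.floordiv (pvCnt xs w * (pvCnt xs w - 1)) 2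
  else if w * 4 = p * 3 then pvCnt xs w * pvCnt xs p
  else if w * 2 = p then pvCnt xs w * pvCnt xs p
  else if w * 3 = p * 2 then pvCnt xs w * pvCnt xs p
  else 0


-- a first write of key w: d[w] = d.get(w, 0) + 1 inserts
theorem modify_eq_insert_of_not_contains (d : PySem.Dict Int Int) (w : Int) (h : d.contains w = false) :
    d.modify w 0 (· + 1) = d.insert w 1 := by
  have hg : d.get? w = none := by
    rw [PySem.Dict.contains_eq_isSome_get?] at h
    cases hx : d.get? w <;> simp [hx] at h ⊢
  simp [PySem.Dict.modify, PySem.Dict.insert, PySem.Dict.getD_eq_get?_getD, h, hg]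

theorem foldA_eq_foldC (xs : List Int) (d : PySem.Dict Int Int) :
    xs.foldl (fun d w => if d.contains w then d.modify w 0 (· + 1) else d.insert w 1) d
      = xs.foldl (fun d x => d.modify x 0 (· + 1)) d := by
  induction xs generalizing d with
  | nil => rfl
  | cons a l ih =>
    simp only [List.foldl_cons]
    rw [show (if d.contains a then d.modify a 0 (· + 1) else d.insert a 1) = d.modify a 0 (· + 1) by
      cases h : d.contains a with
      | true => simp [h]
      | false => simp [modify_eq_insert_of_not_contains d a h]]
    exact ih _

theorem dictA_eq_counter (xs : List Int) :
    xs.foldl (fun d w => if d.contains w then d.modify w 0 (· + 1) else d.insert w 1)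
      PySem.Dict.empty = PySem.Dict.counter xs := by
  rw [PySem.Dict.counter_eq_foldl, foldA_eq_foldC]

theorem sum_if_unique (L : List Int) (hnd : L.Nodup) (P : Int → Prop) [DecidablePred P]
    (v : Int → Int) (t : Int) (ht : ∀ p, P p → p = t) :
    (L.map (fun p => if P p then v p else 0)).sum = if t ∈ L ∧ P t then v t else 0 := by
  induction L with
  | nil => simp
  | cons a l ih =>
    rw [List.nodup_cons] at hnd
    obtain ⟨ha, hl⟩ := hnd
    simp only [List.map_cons, List.sum_cons, ih hl]
    by_cases hPa : P a
    · have hat : a = t := ht a hPa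
      subst hat
      simp [hPa, ha]
    · by_cases hta : t = a
      · subst hta; simp [hPa]
      · simp only [if_neg hPa, zero_add, List.mem_cons]
        congr 1
        simp [eq_iff_iff]
        intro hPt
        have := ht t hPt
        tauto

theorem A_eq_sum (xs : List Int) :
    solution xs =
      ((PySem.Set.ofList xs).map
        (fun w => ((PySem.Set.ofList xs).map (pvPhi xs w)).sum)).sum := by
  have hperm : (PySem.List.sorted (PySem.Set.ofList xs) (fun x => x) false).Perm
      (PySem.Set.ofList xs) := PySem.List.sorted_perm _ _ _
  unfold solution
  simp only [dictA_eq_counter, PySem.Dict.keys_counter, PySem.Set.ofList_ofList,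
    PySem.Dict.getD_counter]
  have hbody : ∀ w : Int, (fun (answer p : Int) =>
      if w = p then
        answer + PySem.Int.floordiv ((xs.count w : Int) * ((xs.count w : Int) - 1)) 2
      else if w * 4 = p * 3 then answer + (xs.count w : Int) * (xs.count p : Int)
      else if w * 2 = p then answer + (xs.count w : Int) * (xs.count p : Int)
      else if w * 3 = p * 2 then answer + (xs.count w : Int) * (xs.count p : Int)
      else answer) = fun answer p => answer + pvPhi xs w p := by
    intro w; funext a p
    simp only [pvPhi, pvCnt]
    split_ifs <;> ring
  simp only [hbody, PySem.List.foldl_add, zero_add]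
  rw [(hperm.map _).sum_eq]
  apply congrArg
  apply List.map_congr_left
  intro w _
  rw [(hperm.map _).sum_eq]

theorem B_eq_sum (xs : List Int) :
    solution_alt xs =
      ((PySem.Set.ofList xs).map (fun w =>
        PySem.Int.floordiv (pvCnt xs w * (pvCnt xs w - 1)) 2
        + (([2 * w]
            ++ (if PySem.Int.mod w 3 = 0 then [PySem.Int.floordiv (4 * w) 3] else [])
            ++ (if PySem.Int.mod w 2 = 0 then [PySem.Int.floordiv (3 * w) 2] else [])).map
            (fun p => if p ≠ w ∧ p ∈ xs then pvCnt xs w * pvCnt xs p else 0)).sum)).sum := by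
  unfold solution_alt
  simp only [PySem.Dict.foldl_insert_getD_add_one_eq_counter, PySem.Dict.items_counter,
    PySem.Dict.getD_counter, PySem.Dict.contains_counter, List.foldl_map]
  have hinner : ∀ (w c : Int), (fun (t p : Int) =>
      if p ≠ w ∧ xs.contains p = true then t + c * (xs.count p : Int) else t)
      = fun t p => t + (if p ≠ w ∧ p ∈ xs then c * (xs.count p : Int) else 0) := by
    intro w c; funext t p
    simp only [List.contains_iff_mem]
    split_ifs <;> ring
  simp only [hinner, PySem.List.foldl_add]
  have h2 : (fun (total : Int) (w : Int) =>
      total + PySem.Int.floordiv ((xs.count w : Int) * ((xs.count w : Int) - 1)) 2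
      + (([2 * w]
          ++ (if PySem.Int.mod w 3 = 0 then [PySem.Int.floordiv (4 * w) 3] else [])
          ++ (if PySem.Int.mod w 2 = 0 then [PySem.Int.floordiv (3 * w) 2] else [])).map
          (fun p => if p ≠ w ∧ p ∈ xs then (xs.count w : Int) * (xs.count p : Int) else 0)).sum)
      = fun total w => total +
        (PySem.Int.floordiv ((xs.count w : Int) * ((xs.count w : Int) - 1)) 2
        + (([2 * w]
            ++ (if PySem.Int.mod w 3 = 0 then [PySem.Int.floordiv (4 * w) 3] else [])
            ++ (if PySem.Int.mod w 2 = 0 then [PySem.Int.floordiv (3 * w) 2] else [])).map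
            (fun p => if p ≠ w ∧ p ∈ xs then (xs.count w : Int) * (xs.count p : Int) else 0)).sum) := by
    funext t w; ring
  rw [h2, PySem.List.foldl_add, zero_add]
  rfl

theorem row_eq (xs : List Int) (w : Int) (hw : w ∈ xs) :
    ((PySem.Set.ofList xs).map (pvPhi xs w)).sum =
      PySem.Int.floordiv (pvCnt xs w * (pvCnt xs w - 1)) 2
      + (([2 * w]
          ++ (if PySem.Int.mod w 3 = 0 then [PySem.Int.floordiv (4 * w) 3] else [])
          ++ (if PySem.Int.mod w 2 = 0 then [PySem.Int.floordiv (3 * w) 2] else [])).map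
          (fun p => if p ≠ w ∧ p ∈ xs then pvCnt xs w * pvCnt xs p else 0)).sum := by
  have hnd := PySem.Set.nodup_ofList xs
  have hwL : w ∈ PySem.Set.ofList xs := (PySem.Set.mem_ofList xs w).mpr hw
  have hsplit : (PySem.Set.ofList xs).map (pvPhi xs w) = (PySem.Set.ofList xs).map (fun p =>
      (if p = w then PySem.Int.floordiv (pvCnt xs w * (pvCnt xs w - 1)) 2 else 0)
      + ((if p ≠ w ∧ w * 4 = p * 3 then pvCnt xs w * pvCnt xs p else 0)
      + ((if p ≠ w ∧ w * 2 = p then pvCnt xs w * pvCnt xs p else 0)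
      + (if p ≠ w ∧ w * 3 = p * 2 then pvCnt xs w * pvCnt xs p else 0)))) := by
    apply List.map_congr_left; intro p _
    simp only [pvPhi]
    split_ifs <;> first | ring1 | (exfalso; omega)
  rw [hsplit, PySem.List.sum_map_add_int, PySem.List.sum_map_add_int, PySem.List.sum_map_add_int]
  have hmem : ∀ q : Int, q ∈ PySem.Set.ofList xs ↔ q ∈ xs := fun q => PySem.Set.mem_ofList xs q
  have hCC : ((PySem.Set.ofList xs).map (fun p =>
      if p = w then PySem.Int.floordiv (pvCnt xs w * (pvCnt xs w - 1)) 2 else 0)).sum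
      = PySem.Int.floordiv (pvCnt xs w * (pvCnt xs w - 1)) 2 := by
    rw [sum_if_unique _ hnd _ _ w (fun p hp => hp)]
    simp [hwL]
  have hγ : ((PySem.Set.ofList xs).map (fun p =>
      if p ≠ w ∧ w * 2 = p then pvCnt xs w * pvCnt xs p else 0)).sum
      = (if 2 * w ≠ w ∧ 2 * w ∈ xs then pvCnt xs w * pvCnt xs (2 * w) else 0) := by
    rw [sum_if_unique _ hnd _ _ (2 * w) (by intro p hp; omega)]
    exact if_congr ⟨fun h => ⟨h.2.1, (hmem _).mp h.1⟩,
      fun h => ⟨(hmem _).mpr h.2, h.1, by ring⟩⟩ rfl rfl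
  by_cases h3 : (3 : Int) ∣ w
  · obtain ⟨k, hk⟩ := h3
    have ht4 : PySem.Int.floordiv (4 * w) 3 = 4 * k := by
      rw [PySem.Int.floordiv_eq_iff_of_pos (by norm_num)]; omega
    have hβ : ((PySem.Set.ofList xs).map (fun p =>
        if p ≠ w ∧ w * 4 = p * 3 then pvCnt xs w * pvCnt xs p else 0)).sum
        = (if PySem.Int.floordiv (4 * w) 3 ≠ w ∧ PySem.Int.floordiv (4 * w) 3 ∈ xs then
            pvCnt xs w * pvCnt xs (PySem.Int.floordiv (4 * w) 3) else 0) := by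
      rw [sum_if_unique _ hnd _ _ (4 * k) (by intro p hp; omega), ht4]
      exact if_congr ⟨fun h => ⟨h.2.1, (hmem _).mp h.1⟩,
        fun h => ⟨(hmem _).mpr h.2, h.1, by omega⟩⟩ rfl rfl
    have hm3 : PySem.Int.mod w 3 = 0 := (PySem.Int.mod_eq_zero_iff_dvd w 3).mpr ⟨k, hk⟩
    by_cases h2 : (2 : Int) ∣ w
    · obtain ⟨j, hj⟩ := h2
      have ht3 : PySem.Int.floordiv (3 * w) 2 = 3 * j := by
        rw [PySem.Int.floordiv_eq_iff_of_pos (by norm_num)]; omega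
      have hδ : ((PySem.Set.ofList xs).map (fun p =>
          if p ≠ w ∧ w * 3 = p * 2 then pvCnt xs w * pvCnt xs p else 0)).sum
          = (if PySem.Int.floordiv (3 * w) 2 ≠ w ∧ PySem.Int.floordiv (3 * w) 2 ∈ xs then
              pvCnt xs w * pvCnt xs (PySem.Int.floordiv (3 * w) 2) else 0) := by
        rw [sum_if_unique _ hnd _ _ (3 * j) (by intro p hp; omega), ht3]
        exact if_congr ⟨fun h => ⟨h.2.1, (hmem _).mp h.1⟩,
          fun h => ⟨(hmem _).mpr h.2, h.1, by omega⟩⟩ rfl rfl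
      have hm2 : PySem.Int.mod w 2 = 0 := (PySem.Int.mod_eq_zero_iff_dvd w 2).mpr ⟨j, hj⟩
      rw [hCC, hβ, hγ, hδ]
      simp only [hm3, hm2, if_pos rfl, List.map_append, List.sum_append,
        List.map_cons, List.map_nil, List.sum_cons, List.sum_nil, if_true, if_false]
      ring
    · have hδ : ((PySem.Set.ofList xs).map (fun p =>
          if p ≠ w ∧ w * 3 = p * 2 then pvCnt xs w * pvCnt xs p else 0)).sum = 0 := by
        rw [sum_if_unique _ hnd _ _ w (by intro p hp; exfalso; omega)]
        simp
      have hm2 : ¬ PySem.Int.mod w 2 = 0 := fun h => h2 ((PySem.Int.mod_eq_zero_iff_dvd w 2).mp h)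
      rw [hCC, hβ, hγ, hδ]
      simp only [hm3, hm2, if_pos rfl, if_neg hm2, List.map_append, List.sum_append,
        List.map_cons, List.map_nil, List.sum_cons, List.sum_nil, if_true, if_false]
      ring
  · have hβ : ((PySem.Set.ofList xs).map (fun p =>
        if p ≠ w ∧ w * 4 = p * 3 then pvCnt xs w * pvCnt xs p else 0)).sum = 0 := by
      rw [sum_if_unique _ hnd _ _ w (by intro p hp; exfalso; omega)]
      simp
    have hm3 : ¬ PySem.Int.mod w 3 = 0 := fun h => h3 ((PySem.Int.mod_eq_zero_iff_dvd w 3).mp h)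
    by_cases h2 : (2 : Int) ∣ w
    · obtain ⟨j, hj⟩ := h2
      have ht3 : PySem.Int.floordiv (3 * w) 2 = 3 * j := by
        rw [PySem.Int.floordiv_eq_iff_of_pos (by norm_num)]; omega
      have hδ : ((PySem.Set.ofList xs).map (fun p =>
          if p ≠ w ∧ w * 3 = p * 2 then pvCnt xs w * pvCnt xs p else 0)).sum
          = (if PySem.Int.floordiv (3 * w) 2 ≠ w ∧ PySem.Int.floordiv (3 * w) 2 ∈ xs then
              pvCnt xs w * pvCnt xs (PySem.Int.floordiv (3 * w) 2) else 0) := by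
        rw [sum_if_unique _ hnd _ _ (3 * j) (by intro p hp; omega), ht3]
        exact if_congr ⟨fun h => ⟨h.2.1, (hmem _).mp h.1⟩,
          fun h => ⟨(hmem _).mpr h.2, h.1, by omega⟩⟩ rfl rfl
      have hm2 : PySem.Int.mod w 2 = 0 := (PySem.Int.mod_eq_zero_iff_dvd w 2).mpr ⟨j, hj⟩
      rw [hCC, hβ, hγ, hδ]
      simp only [hm3, hm2, if_pos rfl, List.map_append, List.sum_append,
        List.map_cons, List.map_nil, List.sum_cons, List.sum_nil, if_true, if_false]
      ring
    · have hδ : ((PySem.Set.ofList xs).map (fun p =>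
          if p ≠ w ∧ w * 3 = p * 2 then pvCnt xs w * pvCnt xs p else 0)).sum = 0 := by
        rw [sum_if_unique _ hnd _ _ w (by intro p hp; exfalso; omega)]
        simp
      have hm2 : ¬ PySem.Int.mod w 2 = 0 := fun h => h2 ((PySem.Int.mod_eq_zero_iff_dvd w 2).mp h)
      rw [hCC, hβ, hγ, hδ]
      simp only [if_neg hm3, if_neg hm2, List.map_append, List.sum_append,
        List.map_cons, List.map_nil, List.sum_cons, List.sum_nil, if_false]
      ring

-- ===== VERDICT (by name: the statement is the Claim_ definition above) =====
theorem solution_spec : Claim_equal_solution := by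
  intro weights _
  unfold Spec_solution
  rw [A_eq_sum, B_eq_sum]
  apply congrArg
  apply List.map_congr_left
  intro w hw
  exact row_eq weights w ((PySem.Set.mem_ofList weights w).mp hw)
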